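-- pv_equiv track=rewrite | github.com/zongzuoscc/learngit | 语法作业/python5实验5.3.py | check_beads
-- ===== SOURCE A (Python) =====
-- def check_beads(seller, buyer):
--     counts = {}
--
--     # 统计卖家的珠串中各个颜色的个数
--     for bead in seller:
--         if bead in counts:
--             counts[bead] += 1
--         else:
--             counts[bead] = 1
--
--     required_count = 0
--
--     # 统计买家的珠串中各个颜色的个数以及总数
--     for bead in buyer:
--         if bead in counts and counts[bead] > 0:
--             counts[bead] -= 1
--         else:
--             required_count += 1
--
--     # 判断是否可以买，并输出
--     if required_count == 0:
--         extra = len(seller) - len(buyer)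
--         return "Yes", extra
--     else:
--         return "No", required_count
-- ===== SOURCE B (Python) =====
-- def check_beads(seller, buyer):
--     seller_count = {}
--     for bead in seller:
--         seller_count[bead] = seller_count.get(bead, 0) + 1
--     buyer_count = {}
--     for bead in buyer:
--         buyer_count[bead] = buyer_count.get(bead, 0) + 1
--     required = sum(max(0, need - seller_count.get(color, 0))
--                    for color, need in buyer_count.items())
--     if required == 0:
--         return "Yes", len(seller) - len(buyer)
--     return "No", required
-- ===== Notes on version B (the rewrite author's own statement) =====
-- stated objective: simpler
-- what changed: B builds frequency tables for seller and buyer and computes the shortfall as a sum of max(0, need - have) over the distinct buyer colors, instead of A's per-bead consuming loop that decrements a mutable counts dict.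
import Mathlib
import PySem

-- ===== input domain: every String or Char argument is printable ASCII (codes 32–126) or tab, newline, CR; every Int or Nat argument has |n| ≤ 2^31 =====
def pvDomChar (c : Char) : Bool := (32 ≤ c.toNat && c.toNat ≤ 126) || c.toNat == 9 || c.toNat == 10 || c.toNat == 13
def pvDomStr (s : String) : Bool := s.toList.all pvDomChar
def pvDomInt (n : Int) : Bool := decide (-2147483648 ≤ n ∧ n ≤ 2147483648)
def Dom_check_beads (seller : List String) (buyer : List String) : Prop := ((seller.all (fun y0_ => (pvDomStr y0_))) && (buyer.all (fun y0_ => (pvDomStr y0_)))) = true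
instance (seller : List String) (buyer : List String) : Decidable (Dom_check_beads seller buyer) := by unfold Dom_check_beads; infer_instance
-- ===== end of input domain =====

-- B computes the shortfall as a sum of max(0, need - have) over distinct buyer colors
-- from two frequency tables, instead of A's per-bead consuming loop; objective: simpler.


-- ===== PORT A =====
def check_beads (seller : List String) (buyer : List String) : String × Int :=
  let counts : PySem.Dict String Int :=
    seller.foldl (fun counts bead =>
      if counts.contains bead then counts.modify bead 0 (· + 1)
      else counts.insert bead 1) PySem.Dict.empty
  let st : PySem.Dict String Int × Int :=
    buyer.foldl (fun st bead =>
      if st.1.contains bead && decide (st.1.getD bead 0 > 0) then (st.1.modify bead 0 (· - 1), st.2)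
      else (st.1, st.2 + 1)) (counts, 0)
  if st.2 = 0 then ("Yes", (seller.length : Int) - (buyer.length : Int))
  else ("No", st.2)

-- ===== PORT B =====
def check_beads_alt (seller : List String) (buyer : List String) : String × Int :=
  let seller_count : PySem.Dict String Int :=
    seller.foldl (fun d bead => d.insert bead (d.getD bead 0 + 1)) PySem.Dict.empty
  let buyer_count : PySem.Dict String Int :=
    buyer.foldl (fun d bead => d.insert bead (d.getD bead 0 + 1)) PySem.Dict.empty
  let required : Int :=
    (buyer_count.items.map (fun p => max 0 (p.2 - seller_count.getD p.1 0))).sum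
  if required = 0 then ("Yes", (seller.length : Int) - (buyer.length : Int))
  else ("No", required)

-- ===== PRECONDITION & SPEC =====
def Spec_check_beads (seller : List String) (buyer : List String) (out : String × Int) : Prop := out = check_beads_alt seller buyer
instance (seller : List String) (buyer : List String) (out : String × Int) : Decidable (Spec_check_beads seller buyer out) := by unfold Spec_check_beads; infer_instance

-- ===== CLAIM (what is proved, stated in full; the proofs are below) =====
def Claim_equal_check_beads : Prop := ∀ (seller : List String) (buyer : List String), Dom_check_beads seller buyer → Spec_check_beads seller buyer (check_beads seller buyer)

-- ===== LEMMAS AND PROOFS =====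

-- abstract version of A's consuming second loop: g is the current stock per color
def reqFun : List String → (String → Int) → Int
  | [], _ => 0
  | b :: rest, g =>
      if g b > 0 then reqFun rest (fun c => if c = b then g b - 1 else g c)
      else 1 + reqFun rest g

lemma lemA1 (seller : List String) :
    (seller.foldl (fun counts bead =>
      if counts.contains bead then counts.modify bead 0 (· + 1)
      else counts.insert bead 1) (PySem.Dict.empty : PySem.Dict String Int))
    = seller.foldl (fun d x => d.modify x 0 (· + 1)) PySem.Dict.empty := by
  have hfun : (fun (counts : PySem.Dict String Int) bead =>
      if counts.contains bead then counts.modify bead 0 (· + 1)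
      else counts.insert bead 1) = fun d x => d.modify x 0 (· + 1) := by
    funext d b
    by_cases h : d.contains b = true
    · simp [h]
    · simp only [Bool.not_eq_true] at h
      simp [h, PySem.Dict.insert, PySem.Dict.modify,
        PySem.Dict.getD_of_not_contains d 0 h]
  exact congrFun (congrFun (congrArg List.foldl hfun) PySem.Dict.empty) seller

lemma lemA2 (buyer : List String) (d : PySem.Dict String Int) (g : String → Int) (req : Int)
    (hg : ∀ c, d.getD c 0 = g c)
    (hc : ∀ c, 0 < g c → d.contains c = true) :
    (buyer.foldl (fun st bead =>
      if st.1.contains bead && decide (st.1.getD bead 0 > 0) then (st.1.modify bead 0 (· - 1), st.2)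
      else (st.1, st.2 + 1)) (d, req)).2 = req + reqFun buyer g := by
  induction buyer generalizing d g req with
  | nil => simp [reqFun]
  | cons b rest ih =>
    by_cases hb : 0 < g b
    · have hcb : d.contains b = true := hc b hb
      have hcond : (d.contains b && decide (d.getD b 0 > 0)) = true := by
        simp [hcb, hg b, hb]
      simp only [List.foldl_cons, hcond, reqFun, if_pos hb]
      exact ih (d.modify b 0 (· - 1)) (fun c => if c = b then g b - 1 else g c) req
        (by
          intro c
          rw [PySem.Dict.getD_modify]
          by_cases hcb' : c = b <;> simp [hcb', hg c]
          rw [hg b])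
        (by
          intro c hcpos
          rw [PySem.Dict.contains_modify]
          by_cases hcb' : c = b
          · simp [hcb']
          · simp only [hcb', if_false] at hcpos ⊢
            simp [hc c (by simpa [hcb'] using hcpos)])
    · have hcond : (d.contains b && decide (d.getD b 0 > 0)) = false := by
        simp [hg b]
        intro _
        omega
      simp only [List.foldl_cons, hcond, Bool.false_eq_true, if_false, reqFun, if_neg hb]
      rw [ih d g (req + 1) hg hc]
      ring

lemma lemCrux (l : List String) (g : String → Int) (K : List String)
    (hK : K.Nodup) (hsub : ∀ c, c ∈ l → c ∈ K) (hg : ∀ c, 0 ≤ g c) :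
    reqFun l g = (K.map (fun c => max 0 ((l.count c : Int) - g c))).sum := by
  induction l generalizing g with
  | nil =>
    simp only [reqFun, List.count_nil, Nat.cast_zero, zero_sub]
    symm
    apply List.sum_eq_zero
    intro x hx
    simp only [List.mem_map] at hx
    obtain ⟨c, _, rfl⟩ := hx
    simp [hg c]
  | cons b rest ih =>
    have hcount : ∀ c, ((b :: rest).count c : Int) = (rest.count c : Int) + (if c = b then 1 else 0) := by
      intro c
      by_cases h : c = b
      · simp [h]
      · rw [if_neg h]; simp [Ne.symm h]
    by_cases hb : 0 < g b
    · have := ih (fun c => if c = b then g b - 1 else g c)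
        (fun c hc => hsub c (List.mem_cons_of_mem _ hc))
        (by
          intro c
          show 0 ≤ if c = b then g b - 1 else g c
          by_cases h : c = b
          · rw [if_pos h]; omega
          · rw [if_neg h]; exact hg c)
      rw [reqFun, if_pos hb, this]
      congr 1
      apply List.map_congr_left
      intro c _
      rw [hcount c]
      beta_reduce
      show max 0 ((rest.count c : Int) - if c = b then g b - 1 else g c)
        = max 0 (((rest.count c : Int) + if c = b then 1 else 0) - g c)
      by_cases h : c = b
      · rw [if_pos h, if_pos h, h]; ring_nf
      · rw [if_neg h, if_neg h]; ring_nf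
    · have hb0 : g b = 0 := le_antisymm (by omega) (hg b)
      rw [reqFun, if_neg hb, ih g (fun c hc => hsub c (List.mem_cons_of_mem _ hc)) hg]
      have hpt : (fun c => max 0 (((b :: rest).count c : Int) - g c))
          = fun c => max 0 ((rest.count c : Int) - g c) + (if c = b then 1 else 0) := by
        funext c
        rw [hcount c]
        by_cases h : c = b
        · simp [h, hb0]
          have : (0:Int) ≤ (rest.count b : Int) := by positivity
          omega
        · simp [h]
      rw [hpt]
      rw [show (K.map fun c => max 0 ((rest.count c : Int) - g c) + (if c = b then 1 else 0)).sum
            = (K.map fun c => max 0 ((rest.count c : Int) - g c)).sum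
              + (K.map fun c => if c = b then (1:Int) else 0).sum from
          PySem.List.sum_map_add_int K _ _]
      rw [PySem.List.sum_map_ite_one_zero' (fun x => x = b) K]
      have hcnt : K.countP (fun x => decide (x = b)) = K.count b := by
        apply List.countP_congr
        intro x _
        simp [beq_iff_eq]
      rw [hcnt, List.count_eq_one_of_mem hK (hsub b (List.mem_cons_self))]
      ring

-- ===== VERDICT (by name: the statement is the Claim_ definition above) =====
theorem check_beads_spec : Claim_equal_check_beads := by
  intro seller buyer _
  unfold Spec_check_beads check_beads check_beads_alt
  simp only [lemA1 seller, ← PySem.Dict.counter_eq_foldl,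
    PySem.Dict.foldl_insert_getD_add_one_eq_counter]
  have hA : (buyer.foldl (fun st bead =>
      if st.1.contains bead && decide (st.1.getD bead 0 > 0) then (st.1.modify bead 0 (· - 1), st.2)
      else (st.1, st.2 + 1)) (PySem.Dict.counter seller, 0)).2
      = reqFun buyer (fun c => (seller.count c : Int)) := by
    rw [lemA2 buyer (PySem.Dict.counter seller) (fun c => (seller.count c : Int)) 0
      (fun c => PySem.Dict.getD_counter seller c)
      (fun c hc => by
        rw [PySem.Dict.contains_counter]
        have hc' : (0:Int) < (seller.count c : Int) := hc
        have : c ∈ seller := List.count_pos_iff.mp (by exact_mod_cast hc')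
        simpa using this)]
    ring
  have hB : ((PySem.Dict.counter buyer).items.map
        (fun p => max 0 (p.2 - (PySem.Dict.counter seller).getD p.1 0))).sum
      = reqFun buyer (fun c => (seller.count c : Int)) := by
    rw [PySem.Dict.items_counter, List.map_map,
      lemCrux buyer (fun c => (seller.count c : Int)) (PySem.Set.ofList buyer)
        (PySem.Set.nodup_ofList buyer)
        (fun c hc => (PySem.Set.mem_ofList buyer c).mpr hc)
        (fun c => by positivity)]
    congr 1
    apply List.map_congr_left
    intro c _
    simp [PySem.Dict.getD_counter]
  rw [hA, hB]
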